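-- pv_equiv track=rewrite | github.com/chriskeh/AdventOfCode-2023 | day01/part2.py | get_leftmost_digit_from_line
-- ===== SOURCE A (Python) =====
-- def get_leftmost_digit_from_line(line):
--     # Walk over the string from left to right.
--     # If the character is a digit, return it as int()
--     # If not, check if this is the start of a written digit. If one is found, return it as int()
--     # If we didn't find any, return -1
--     number_words = ["zero", "one", "two", "three", "four", "five", "six", "seven", "eight", "nine"]
--
--     index = 0
--     while index < len(line):
--         # If this is a digit, return it right away
--         if line[index].isdecimal():
--             return int(line[index])
--         # No digit, so let's see if we found a digit as written text
--         text_to_check = line[index:]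
--         number = 0
--         while number < 10:
--             if text_to_check.startswith(number_words[number]):
--                 return number
--             number += 1
--         index += 1
--     return -1
-- ===== SOURCE B (Python) =====
-- def get_leftmost_digit_from_line(line):
--     words = ["zero", "one", "two", "three", "four", "five", "six", "seven", "eight", "nine"]
--     candidates = []
--     pos = next((i for i, ch in enumerate(line) if ch.isdecimal()), None)
--     if pos is not None:
--         candidates.append((pos, int(line[pos])))
--     for value, word in enumerate(words):
--         found = line.find(word)
--         if found != -1:
--             candidates.append((found, value))
--     if not candidates:
--         return -1
--     return min(candidates, key=lambda c: c[0])[1]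
-- ===== Notes on version B (the rewrite author's own statement) =====
-- stated objective: faster
-- what changed: Instead of scanning position by position and testing all ten words at each offset, B makes one pass for the first decimal character and one substring search (str.find) per word, then returns the value at the minimum position.
import Mathlib
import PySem

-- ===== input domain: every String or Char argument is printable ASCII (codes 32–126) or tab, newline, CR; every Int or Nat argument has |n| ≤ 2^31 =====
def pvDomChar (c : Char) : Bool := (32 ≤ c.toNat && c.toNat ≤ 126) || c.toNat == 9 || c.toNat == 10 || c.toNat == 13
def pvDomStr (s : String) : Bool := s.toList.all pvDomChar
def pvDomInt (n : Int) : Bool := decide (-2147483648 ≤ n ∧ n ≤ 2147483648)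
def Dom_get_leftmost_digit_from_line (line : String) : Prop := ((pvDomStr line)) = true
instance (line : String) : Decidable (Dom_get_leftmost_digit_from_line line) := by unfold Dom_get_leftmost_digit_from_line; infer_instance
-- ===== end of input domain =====

-- B changes the decomposition: one scan for the first decimal character plus one str.find per
-- spelled-out word, then the value at the minimum position — instead of A's per-position scan
-- that retries all ten words at every offset.

-- the ten number words, shared data of both ports
def pvNumberWords : List (List Char) :=
  [['z','e','r','o'], ['o','n','e'], ['t','w','o'], ['t','h','r','e','e'], ['f','o','u','r'],
   ['f','i','v','e'], ['s','i','x'], ['s','e','v','e','n'], ['e','i','g','h','t'], ['n','i','n','e']]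

-- ===== PORT A =====
-- inner 'while number < 10: if text_to_check.startswith(number_words[number]) …'
def pvScanWords (t : List Char) : List (Int × List Char) → Option Int
  | [] => none
  | vw :: rest => if PySem.Chars.startswith t vw.2 then some vw.1 else pvScanWords t rest

-- outer 'while index < len(line)'; Chars.isdigit = str.isdecimal and
-- (c.toNat - 48) = int(c) exactly on the ASCII domain (isdecimal guarantees a digit char)
def pvWalk : List Char → Int
  | [] => -1
  | c :: rest =>
    if PySem.Chars.isdigit c then ((c.toNat : Int) - 48)
    else
      match pvScanWords (c :: rest) (PySem.List.enumerate pvNumberWords 0) with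
      | some n => n
      | none => pvWalk rest

def get_leftmost_digit_from_line (line : String) : Int := pvWalk line.toList

-- ===== PORT B =====
-- 'next((i for i, ch in enumerate(line) if ch.isdecimal()), None)' + 'int(line[pos])'
def pvDigitCandidate (cs : List Char) : List (Int × Int) :=
  match (PySem.List.enumerate cs 0).find? (fun p => PySem.Chars.isdigit p.2) with
  | some p => [(p.1, (p.2.toNat : Int) - 48)]
  | none => []

-- 'for value, word in enumerate(words): found = line.find(word); if found != -1: append'
def pvWordCandidates (cs : List Char) : List (Int × Int) :=
  (PySem.List.enumerate pvNumberWords 0).filterMap (fun vw =>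
    if PySem.Chars.find cs vw.2 = -1 then none
    else some (PySem.Chars.find cs vw.2, vw.1))

-- 'min(candidates, key=lambda c: c[0])[1]', -1 on no candidates
def get_leftmost_digit_from_line_alt (line : String) : Int :=
  match PySem.List.min? (pvDigitCandidate line.toList ++ pvWordCandidates line.toList)
      (fun c => c.1) with
  | some m => m.2
  | none => -1

-- ===== PRECONDITION & SPEC =====
def Spec_get_leftmost_digit_from_line (line : String) (out : Int) : Prop := out = get_leftmost_digit_from_line_alt line
instance (line : String) (out : Int) : Decidable (Spec_get_leftmost_digit_from_line line out) := by unfold Spec_get_leftmost_digit_from_line; infer_instance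

-- ===== CLAIM (what is proved, stated in full; the proofs are below) =====
def Claim_equal_get_leftmost_digit_from_line : Prop := ∀ (line : String), Dom_get_leftmost_digit_from_line line → Spec_get_leftmost_digit_from_line line (get_leftmost_digit_from_line line)

-- ===== LEMMAS AND PROOFS =====

-- proof-side generalisations of B's candidate lists, with an absolute position offset s
def pvDC (cs : List Char) (s : Int) : List (Int × Int) :=
  match (PySem.List.enumerate cs s).find? (fun p => PySem.Chars.isdigit p.2) with
  | some p => [(p.1, (p.2.toNat : Int) - 48)]
  | none => []

def pvWC (cs : List Char) (s : Int) : List (Int × Int) :=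
  (PySem.List.enumerate pvNumberWords 0).filterMap (fun vw =>
    if PySem.Chars.find cs vw.2 = -1 then none
    else some (PySem.Chars.find cs vw.2 + s, vw.1))

def pvRes (l : List (Int × Int)) : Int :=
  match PySem.List.min? l (fun c => c.1) with
  | some m => m.2
  | none => -1

-- min? returns the unique key-minimal element
theorem pv_min?_eq_some_of (xs : List (Int × Int)) (m : Int × Int) (hm : m ∈ xs)
    (hmin : ∀ y ∈ xs, m.1 ≤ y.1) (huniq : ∀ y ∈ xs, y.1 = m.1 → y = m) :
    PySem.List.min? xs (fun c => c.1) = some m := by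
  cases h : PySem.List.min? xs (fun c => c.1) with
  | none =>
      rw [PySem.List.min?_eq_none_iff] at h
      subst h; simp at hm
  | some m' =>
      have hm' : m' ∈ xs := PySem.List.min?_mem h
      have h1 : m'.1 ≤ m.1 := PySem.List.min?_isMin h m hm
      have h2 : m.1 ≤ m'.1 := hmin m' hm'
      have := huniq m' hm' (le_antisymm h1 h2)
      rw [this]

-- find s w = k when w occurs at k and nowhere earlier
theorem pv_find_eq_of (s w : List Char) (k : Nat) (h1 : w <+: s.drop k)
    (h2 : ∀ i < k, ¬ w <+: s.drop i) : PySem.Chars.find s w = (k : Int) := by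
  have hin : w <:+: s := (h1.isInfix).trans (List.drop_suffix k s).isInfix
  have hpos : 0 ≤ PySem.Chars.find s w := (PySem.Chars.find_nonneg_iff s w).mpr hin
  obtain ⟨hp, hmin⟩ := PySem.Chars.find_spec hpos
  have hlt : ¬ (PySem.Chars.find s w).toNat < k := fun h => h2 _ h hp
  have hgt : ¬ k < (PySem.Chars.find s w).toNat := fun h => hmin k h h1
  have : (PySem.Chars.find s w).toNat = k := by omega
  omega

-- cons rule for str.find
theorem pv_find_cons (c : Char) (rest w : List Char) :
    PySem.Chars.find (c :: rest) w =
      if PySem.Chars.startswith (c :: rest) w = true then 0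
      else if PySem.Chars.find rest w = -1 then -1 else PySem.Chars.find rest w + 1 := by
  split_ifs with hsw hnone
  · exact pv_find_eq_of _ _ 0 (by simpa using (PySem.Chars.startswith_iff _ _).mp hsw)
      (by intro i hi; omega)
  · rw [PySem.Chars.find_eq_neg_one_iff] at hnone ⊢
    intro hin
    rcases List.infix_cons_iff.mp hin with h | h
    · exact hsw ((PySem.Chars.startswith_iff _ _).mpr h)
    · exact hnone h
  · have hfr : -1 ≤ PySem.Chars.find rest w := PySem.Chars.neg_one_le_find rest w
    have hpos : 0 ≤ PySem.Chars.find rest w := by omega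
    obtain ⟨hp, hmin⟩ := PySem.Chars.find_spec hpos
    have heq := pv_find_eq_of (c :: rest) w ((PySem.Chars.find rest w).toNat + 1)
      (by simpa using hp)
      (by
        intro i hi
        cases i with
        | zero =>
            intro hpre
            exact hsw ((PySem.Chars.startswith_iff _ _).mpr (by simpa using hpre))
        | succ j => exact fun h => hmin j (by omega) (by simpa using h))
    omega

-- cons rule for the digit candidate
theorem pv_dC_cons (c : Char) (rest : List Char) (s : Int) :
    pvDC (c :: rest) s =
      if PySem.Chars.isdigit c = true then [(s, (c.toNat : Int) - 48)] else pvDC rest (s + 1) := by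
  simp only [pvDC, PySem.List.enumerate_cons, List.find?_cons]
  split_ifs with h <;> simp [h]

-- every digit candidate lies at or after the offset
theorem pv_dC_bound (cs : List Char) (s : Int) (p : Int × Int) (hp : p ∈ pvDC cs s) : s ≤ p.1 := by
  induction cs generalizing s with
  | nil => simp [pvDC] at hp
  | cons c rest ih =>
      rw [pv_dC_cons] at hp
      split_ifs at hp with h
      · simp at hp; subst hp; simp
      · have := ih (s + 1) hp; omega

-- shape of a word candidate
theorem pv_wC_mem (cs : List Char) (s : Int) (y : Int × Int) (hy : y ∈ pvWC cs s) :
    ∃ vw ∈ PySem.List.enumerate pvNumberWords 0,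
      PySem.Chars.find cs vw.2 ≠ -1 ∧ y = (PySem.Chars.find cs vw.2 + s, vw.1) := by
  simp only [pvWC, List.mem_filterMap] at hy
  obtain ⟨vw, hvw, hf⟩ := hy
  by_cases h : PySem.Chars.find cs vw.2 = -1
  · rw [if_pos h] at hf; cases hf
  · rw [if_neg h] at hf
    simp only [Option.some.injEq] at hf
    exact ⟨vw, hvw, h, hf.symm⟩

-- if no word matches at the front, the word candidates of c::rest are those of rest, shifted
theorem pv_wC_cons_nomatch (c : Char) (rest : List Char) (s : Int)
    (h : ∀ vw ∈ PySem.List.enumerate pvNumberWords 0, ¬ PySem.Chars.startswith (c :: rest) vw.2 = true) :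
    pvWC (c :: rest) s = pvWC rest (s + 1) := by
  unfold pvWC
  apply List.filterMap_congr
  intro vw hvw
  rw [pv_find_cons, if_neg (h vw hvw)]
  by_cases h1 : PySem.Chars.find rest vw.2 = -1
  · simp [h1]
  · have hfr := PySem.Chars.neg_one_le_find rest vw.2
    have h2 : ¬ PySem.Chars.find rest vw.2 + 1 = -1 := by omega
    rw [if_neg h1, if_neg h1, if_neg h2]
    simp only [Option.some.injEq, Prod.mk.injEq]
    exact ⟨by ring, trivial⟩

-- scanWords lemmas
theorem pv_scanWords_cons (t : List Char) (vw : Int × List Char) (rest : List (Int × List Char)) :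
    pvScanWords t (vw :: rest) =
      if PySem.Chars.startswith t vw.2 = true then some vw.1 else pvScanWords t rest := rfl

theorem pv_scanWords_none (t : List Char) (l : List (Int × List Char))
    (h : pvScanWords t l = none) : ∀ vw ∈ l, ¬ PySem.Chars.startswith t vw.2 = true := by
  induction l with
  | nil => simp
  | cons vw rest ih =>
      rw [pv_scanWords_cons] at h
      split_ifs at h with hs
      intro x hx
      rcases List.mem_cons.mp hx with rfl | hx
      · simp [hs]
      · exact ih h x hx

theorem pv_scanWords_some (t : List Char) (l : List (Int × List Char)) (n : Int)
    (h : pvScanWords t l = some n) :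
    ∃ w, (n, w) ∈ l ∧ PySem.Chars.startswith t w = true := by
  induction l with
  | nil => simp [pvScanWords] at h
  | cons vw rest ih =>
      rw [pv_scanWords_cons] at h
      split_ifs at h with hs
      · cases h; exact ⟨vw.2, by simp, hs⟩
      · obtain ⟨w, hw, hsw⟩ := ih h
        exact ⟨w, List.mem_cons_of_mem _ hw, hsw⟩

-- fixed facts about the ten words: nonempty, letter-headed, no word a prefix of another
theorem pv_words_head (vw : Int × List Char) (h : vw ∈ PySem.List.enumerate pvNumberWords 0) :
    vw.2 ≠ [] ∧ PySem.Chars.isdigit vw.2.headI = false := by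
  have hall : (PySem.List.enumerate pvNumberWords 0).all
      (fun vw => !vw.2.isEmpty && !PySem.Chars.isdigit vw.2.headI) = true := by decide
  rw [List.all_eq_true] at hall
  have h2 := hall vw h
  simp only [Bool.and_eq_true, Bool.not_eq_true', List.isEmpty_eq_false_iff] at h2
  exact ⟨by simpa using h2.1, h2.2⟩

theorem pv_words_noprefix (vw vw' : Int × List Char)
    (h : vw ∈ PySem.List.enumerate pvNumberWords 0)
    (h' : vw' ∈ PySem.List.enumerate pvNumberWords 0) (hp : vw.2 <+: vw'.2) : vw = vw' := by
  have hall : (PySem.List.enumerate pvNumberWords 0).all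
      (fun a => (PySem.List.enumerate pvNumberWords 0).all
        (fun b => !(decide (a.2 <+: b.2)) || decide (a = b))) = true := by decide
  rw [List.all_eq_true] at hall
  have h2 := hall vw h
  rw [List.all_eq_true] at h2
  have h3 := h2 vw' h'
  simp only [Bool.or_eq_true, Bool.not_eq_true', decide_eq_true_eq, decide_eq_false_iff_not] at h3
  rcases h3 with h3 | h3
  · exact absurd hp h3
  · exact h3

-- a digit in front rules out every word in front
theorem pv_digit_no_word (c : Char) (rest : List Char) (hc : PySem.Chars.isdigit c = true) :
    ∀ vw ∈ PySem.List.enumerate pvNumberWords 0, ¬ PySem.Chars.startswith (c :: rest) vw.2 = true := by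
  intro vw hvw hsw
  obtain ⟨hne, hhd⟩ := pv_words_head vw hvw
  obtain ⟨x, w', hxw⟩ := List.exists_cons_of_ne_nil hne
  rw [PySem.Chars.startswith_iff, hxw, List.cons_prefix_cons] at hsw
  rw [hxw] at hhd
  simp only [List.headI] at hhd
  rw [hsw.1] at hhd
  rw [hc] at hhd
  cases hhd

-- main invariant: A's walk equals B's min-of-candidates, at any offset
theorem pv_main (cs : List Char) (s : Int) : pvWalk cs = pvRes (pvDC cs s ++ pvWC cs s) := by
  induction cs generalizing s with
  | nil =>
      have hd : pvDC [] s = [] := by simp [pvDC, PySem.List.enumerate]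
      have hw : pvWC [] s = [] := by
        unfold pvWC
        rw [List.filterMap_eq_nil_iff]
        intro vw hvw
        have hne := (pv_words_head vw hvw).1
        have hf : PySem.Chars.find [] vw.2 = -1 := by
          rw [PySem.Chars.find_eq_neg_one_iff]
          intro hin
          exact hne (List.eq_nil_of_infix_nil hin)
        simp [hf]
      simp [pvWalk, hd, hw, pvRes, PySem.List.min?]
  | cons c rest ih =>
      unfold pvWalk
      split_ifs with hc
      · -- digit at front
        have hd := pv_dC_cons c rest s
        rw [if_pos hc] at hd
        have hnw := pv_digit_no_word c rest hc
        have hmem : ∀ y ∈ pvDC (c :: rest) s ++ pvWC (c :: rest) s,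
            s ≤ y.1 ∧ (y.1 = s → y = (s, (c.toNat : Int) - 48)) := by
          intro y hy
          rcases List.mem_append.mp hy with hy | hy
          · rw [hd] at hy; simp at hy
            subst hy; exact ⟨by simp, fun _ => rfl⟩
          · obtain ⟨vw, hvw, hne, hyeq⟩ := pv_wC_mem _ _ _ hy
            rw [pv_find_cons, if_neg (hnw vw hvw)] at hne hyeq
            split_ifs at hne hyeq with h1
            · exact absurd rfl hne
            · have hfr : -1 ≤ PySem.Chars.find rest vw.2 := PySem.Chars.neg_one_le_find rest vw.2
              have hfr0 : 0 ≤ PySem.Chars.find rest vw.2 := by omega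
              constructor
              · rw [hyeq]; simp; omega
              · intro hk; exfalso; rw [hyeq] at hk; simp at hk; omega
        have hminq : PySem.List.min? (pvDC (c :: rest) s ++ pvWC (c :: rest) s) (fun c => c.1)
            = some (s, (c.toNat : Int) - 48) := by
          apply pv_min?_eq_some_of
          · rw [List.mem_append, hd]; simp
          · intro y hy; exact (hmem y hy).1
          · intro y hy hk; exact (hmem y hy).2 hk
        simp [pvRes, hminq]
      · -- no digit at front
        cases hscan : pvScanWords (c :: rest) (PySem.List.enumerate pvNumberWords 0) with
        | some n =>
            obtain ⟨w, hw, hsw⟩ := pv_scanWords_some _ _ _ hscan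
            have hfind0 : PySem.Chars.find (c :: rest) w = 0 := by
              rw [pv_find_cons, if_pos hsw]
            have hmmem : ((s, n) : Int × Int) ∈ pvWC (c :: rest) s := by
              simp only [pvWC, List.mem_filterMap]
              refine ⟨(n, w), hw, ?_⟩
              rw [hfind0]; norm_num
            have hdd := pv_dC_cons c rest s
            rw [if_neg hc] at hdd
            have hmem : ∀ y ∈ pvDC (c :: rest) s ++ pvWC (c :: rest) s,
                s ≤ y.1 ∧ (y.1 = s → y = (s, n)) := by
              intro y hy
              rcases List.mem_append.mp hy with hy | hy
              · rw [hdd] at hy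
                have hb := pv_dC_bound rest (s + 1) y hy
                exact ⟨by omega, fun hk => by exfalso; omega⟩
              · obtain ⟨vw, hvw, hne, hyeq⟩ := pv_wC_mem _ _ _ hy
                have hfr : -1 ≤ PySem.Chars.find (c :: rest) vw.2 :=
                  PySem.Chars.neg_one_le_find (c :: rest) vw.2
                have hfr0 : 0 ≤ PySem.Chars.find (c :: rest) vw.2 := by omega
                constructor
                · rw [hyeq]; simp; omega
                · intro hk
                  rw [hyeq] at hk; simp at hk
                  have hf0 : PySem.Chars.find (c :: rest) vw.2 = 0 := by omega
                  obtain ⟨hp, -⟩ := PySem.Chars.find_spec hfr0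
                  rw [hf0] at hp; simp at hp
                  have hpw : w <+: (c :: rest) := (PySem.Chars.startswith_iff _ _).mp hsw
                  rcases List.prefix_or_prefix_of_prefix hp hpw with hcmp | hcmp
                  · have hvv := pv_words_noprefix vw (n, w) hvw hw hcmp
                    rw [hyeq, hvv]; simp [hfind0]
                  · have hvv := (pv_words_noprefix (n, w) vw hw hvw hcmp).symm
                    rw [hyeq, hvv]; simp [hfind0]
            have hminq : PySem.List.min? (pvDC (c :: rest) s ++ pvWC (c :: rest) s) (fun c => c.1)
                = some (s, n) := by
              apply pv_min?_eq_some_of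
              · exact List.mem_append.mpr (Or.inr hmmem)
              · intro y hy; exact (hmem y hy).1
              · intro y hy hk; exact (hmem y hy).2 hk
            simp [pvRes, hminq]
        | none =>
            have hnw := pv_scanWords_none _ _ hscan
            have hdd := pv_dC_cons c rest s
            rw [if_neg hc] at hdd
            rw [ih (s + 1), hdd, pv_wC_cons_nomatch c rest s hnw]

-- B's list at offset 0 is the port's list
theorem pv_alt_eq (line : String) :
    get_leftmost_digit_from_line_alt line = pvRes (pvDC line.toList 0 ++ pvWC line.toList 0) := by
  have hd : pvDigitCandidate line.toList = pvDC line.toList 0 := rfl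
  have hw : pvWordCandidates line.toList = pvWC line.toList 0 := by
    unfold pvWordCandidates pvWC
    apply List.filterMap_congr
    intro vw hvw
    simp
  rw [get_leftmost_digit_from_line_alt, hd, hw, pvRes]

-- ===== VERDICT (by name: the statement is the Claim_ definition above) =====
theorem get_leftmost_digit_from_line_spec : Claim_equal_get_leftmost_digit_from_line := by
  intro line _
  unfold Spec_get_leftmost_digit_from_line get_leftmost_digit_from_line
  rw [pv_alt_eq, pv_main]
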